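-- pv_equiv track=rewrite | github.com/waybarrios/Flow-Guided-Feature-Aggregation | fgfa_rfcn/core/loader_ucf101.py | TemporalCenterCrop
-- ===== SOURCE A (Python) =====
-- def TemporalCenterCrop(frame_indices, duration):
--     center_index = len(frame_indices) // 2
--     begin_index = max(0, center_index - (duration // 2))
--     end_index = min(begin_index + duration, len(frame_indices))
--
--     out = frame_indices[begin_index:end_index]
--
--     for index in out:
--         if len(out) >= duration:
--             break
--         out.append(index)
--
--     return out
-- ===== SOURCE B (Python) =====
-- def TemporalCenterCrop(frame_indices, duration):
--     center_index = len(frame_indices) // 2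
--     begin_index = max(0, center_index - (duration // 2))
--     end_index = min(begin_index + duration, len(frame_indices))
--     out = frame_indices[begin_index:end_index]
--     need = duration - len(out)
--     if out and need > 0:
--         L = len(out)
--         out = out + [out[i % L] for i in range(need)]
--     return out
-- ===== Notes on version B (the rewrite author's own statement) =====
-- stated objective: simpler
-- what changed: Replaces A's self-modifying iterate-while-appending padding loop with a direct computation: need = duration - len(window), then pad once with a comprehension that cycles the original window via i % len.
import Mathlib
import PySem

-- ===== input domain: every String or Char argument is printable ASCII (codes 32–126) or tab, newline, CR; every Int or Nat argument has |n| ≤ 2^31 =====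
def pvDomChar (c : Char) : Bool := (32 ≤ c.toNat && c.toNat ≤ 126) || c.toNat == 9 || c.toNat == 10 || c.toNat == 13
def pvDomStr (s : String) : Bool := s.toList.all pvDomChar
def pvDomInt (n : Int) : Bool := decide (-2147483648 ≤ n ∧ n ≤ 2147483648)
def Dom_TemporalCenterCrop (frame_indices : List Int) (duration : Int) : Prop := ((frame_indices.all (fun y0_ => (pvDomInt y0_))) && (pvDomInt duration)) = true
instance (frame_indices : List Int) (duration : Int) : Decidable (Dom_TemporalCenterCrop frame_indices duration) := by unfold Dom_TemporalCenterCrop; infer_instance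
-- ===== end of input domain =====

-- B replaces A's self-modifying iterate-while-appending pad loop with a direct
-- 'need = duration - len; pad once by cycling the window via i % len' step (objective: simpler).

-- ===== PORT A =====
-- A's for-loop over the growing list 'out': read out[i], append it while len(out) < duration.
-- 'fuel' is a totality guard only: it starts at (duration - len(out)).toNat, the exact number of
-- appends the Python loop can still perform, so it never cuts the loop short.
def pvPadLoopA (duration : Int) (fuel : Nat) (out : List Int) (i : Nat) : List Int :=
  match fuel with
  | 0 => out
  | Nat.succ f =>
    if h : i < out.length then
      if duration ≤ (out.length : Int) then out
      else pvPadLoopA duration f (out ++ [out[i]]) (i + 1)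
    else out

def TemporalCenterCrop (frame_indices : List Int) (duration : Int) : List Int :=
  let center_index : Int := PySem.Int.floordiv (frame_indices.length : Int) 2
  let begin_index : Int := max 0 (center_index - PySem.Int.floordiv duration 2)
  let end_index : Int := min (begin_index + duration) (frame_indices.length : Int)
  let out := PySem.List.slice frame_indices (some begin_index) (some end_index)
  pvPadLoopA duration (duration - (out.length : Int)).toNat out 0

-- ===== PORT B =====
def TemporalCenterCrop_alt (frame_indices : List Int) (duration : Int) : List Int :=
  let center_index : Int := PySem.Int.floordiv (frame_indices.length : Int) 2
  let begin_index : Int := max 0 (center_index - PySem.Int.floordiv duration 2)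
  let end_index : Int := min (begin_index + duration) (frame_indices.length : Int)
  let out := PySem.List.slice frame_indices (some begin_index) (some end_index)
  let need : Int := duration - (out.length : Int)
  if out ≠ [] ∧ need > 0 then
    out ++ (List.range need.toNat).map (fun i => out.getD (i % out.length) 0)
  else out

-- ===== PRECONDITION & SPEC =====
def Spec_TemporalCenterCrop (frame_indices : List Int) (duration : Int) (out : List Int) : Prop := out = TemporalCenterCrop_alt frame_indices duration
instance (frame_indices : List Int) (duration : Int) (out : List Int) : Decidable (Spec_TemporalCenterCrop frame_indices duration out) := by unfold Spec_TemporalCenterCrop; infer_instance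

-- ===== CLAIM (what is proved, stated in full; the proofs are below) =====
def Claim_equal_TemporalCenterCrop : Prop := ∀ (frame_indices : List Int) (duration : Int), Dom_TemporalCenterCrop frame_indices duration → Spec_TemporalCenterCrop frame_indices duration (TemporalCenterCrop frame_indices duration)

-- ===== LEMMAS AND PROOFS =====
-- 'cyc w n' = the window w followed by n elements of its cyclic repetition (B's padded shape).
def pvCyc (w : List Int) (n : Nat) : List Int :=
  w ++ (List.range n).map (fun i => w.getD (i % w.length) 0)

theorem pvCyc_length (w : List Int) (n : Nat) : (pvCyc w n).length = w.length + n := by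
  simp [pvCyc]

theorem pvCyc_zero (w : List Int) : pvCyc w 0 = w := by simp [pvCyc]

theorem pvCyc_get (w : List Int) (n : Nat) (h : n < (pvCyc w n).length) :
    (pvCyc w n)[n] = w.getD (n % w.length) 0 := by
  simp only [pvCyc] at h ⊢
  by_cases hn : n < w.length
  · rw [List.getElem_append_left hn]
    rw [Nat.mod_eq_of_lt hn, List.getD_eq_getElem w 0 hn]
  · rw [List.getElem_append_right (by omega)]
    simp only [List.getElem_map, List.getElem_range]
    rw [← Nat.mod_eq_sub_mod (by omega)]

theorem pvCyc_snoc (w : List Int) (n : Nat) (h : n < (pvCyc w n).length) :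
    pvCyc w n ++ [(pvCyc w n)[n]] = pvCyc w (n + 1) := by
  rw [pvCyc_get w n h]
  simp [pvCyc, List.range_succ]

theorem pvPadLoopA_cyc (duration : Int) (w : List Int) (hw : w ≠ []) :
    ∀ (k n : Nat), (duration - (w.length : Int) - n).toNat = k →
      pvPadLoopA duration k (pvCyc w n) n = pvCyc w (n + k) := by
  intro k
  induction k with
  | zero =>
    intro n _
    rw [pvPadLoopA]
    simp
  | succ k ih =>
    intro n hk
    have hL : 0 < w.length := List.length_pos_iff.mpr hw
    have hlt : n < (pvCyc w n).length := by rw [pvCyc_length]; omega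
    rw [pvPadLoopA]
    simp only [dif_pos hlt]
    rw [if_neg (by rw [pvCyc_length]; push_cast; omega)]
    rw [pvCyc_snoc w n hlt]
    rw [ih (n + 1) (by omega)]
    congr 1
    omega

theorem pvPadLoopA_nil (duration : Int) (fuel : Nat) : pvPadLoopA duration fuel [] 0 = [] := by
  cases fuel <;> rw [pvPadLoopA] <;> simp

theorem pvMain (duration : Int) (w : List Int) :
    pvPadLoopA duration (duration - (w.length : Int)).toNat w 0 =
      if w ≠ [] ∧ duration - (w.length : Int) > 0 then
        w ++ (List.range (duration - (w.length : Int)).toNat).map (fun i => w.getD (i % w.length) 0)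
      else w := by
  by_cases hne : w = []
  · subst hne; simp [pvPadLoopA_nil]
  · have h0 : pvPadLoopA duration (duration - (w.length : Int)).toNat w 0 = pvCyc w ((duration - (w.length : Int)).toNat) := by
      have := pvPadLoopA_cyc duration w hne ((duration - (w.length : Int) - ((0:Nat):Int)).toNat) 0 rfl
      rw [pvCyc_zero] at this
      simpa using this
    rw [h0]
    by_cases hpos : duration - (w.length : Int) > 0
    · rw [if_pos ⟨hne, hpos⟩]; rfl
    · rw [if_neg (by tauto)]
      have hz : (duration - (w.length : Int)).toNat = 0 := by omega
      rw [hz, pvCyc_zero]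

-- ===== VERDICT (by name: the statement is the Claim_ definition above) =====
theorem TemporalCenterCrop_spec : Claim_equal_TemporalCenterCrop := by
  intro frame_indices duration _
  unfold Spec_TemporalCenterCrop
  exact pvMain duration
    (PySem.List.slice frame_indices
      (some (max 0 (PySem.Int.floordiv (frame_indices.length : Int) 2 - PySem.Int.floordiv duration 2)))
      (some (min (max 0 (PySem.Int.floordiv (frame_indices.length : Int) 2 - PySem.Int.floordiv duration 2) + duration) (frame_indices.length : Int))))
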